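-- pv_equiv track=rewrite | github.com/hubertit/zoea.mobile.2 | backend/scripts/etike/export_etike_tours.py | _split_tuples
-- ===== SOURCE A (Python) =====
-- from typing import Any, Dict, Iterable, List, Optional, Tuple
--
-- def _split_tuples(values_blob: str) -> List[str]:
--     """
--     Split "(...),(...),(...)" into ["(...)", "(...)"] without breaking on commas in strings.
--     """
--     tuples: List[str] = []
--     i = 0
--     n = len(values_blob)
--     in_str = False
--     esc = False
--     depth = 0
--     start = None
--     while i < n:
--         ch = values_blob[i]
--         if in_str:
--             if esc:
--                 esc = False
--             elif ch == "\\":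
--                 esc = True
--             elif ch == "'":
--                 in_str = False
--         else:
--             if ch == "'":
--                 in_str = True
--             elif ch == "(":
--                 if depth == 0:
--                     start = i
--                 depth += 1
--             elif ch == ")":
--                 depth -= 1
--                 if depth == 0 and start is not None:
--                     tuples.append(values_blob[start : i + 1])
--                     start = None
--         i += 1
--     return tuples
-- ===== SOURCE B (Python) =====
-- from typing import List
--
--
-- def _trailing_backslashes(seg: str) -> int:
--     tb = 0
--     for c in reversed(seg):
--         if c != "\\":
--             break
--         tb += 1
--     return tb
--
--
-- def _mask_strings(parts: List[str]) -> str: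
--     """Rebuild the blob from its quote-split parts with every quoted region
--     (quotes included) blanked out by spaces; a part ending in an odd run of
--     backslashes means the splitting quote was escaped, so the string goes on."""
--     pieces: List[str] = []
--     inside = False
--     last = len(parts) - 1
--     for idx, seg in enumerate(parts):
--         if inside:
--             pieces.append(" " * len(seg))
--             if idx != last:
--                 pieces.append(" ")
--                 inside = _trailing_backslashes(seg) % 2 == 1
--         else:
--             pieces.append(seg)
--             if idx != last:
--                 pieces.append(" ")
--                 inside = True
--     return "".join(pieces)
--
--
-- def _split_tuples(values_blob: str) -> List[str]:
--     """
--     Split "(...),(...)" into ["(...)", "(...)"]: first blank out all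
--     single-quoted strings (split on quotes + trailing-backslash parity),
--     then do a plain parenthesis-depth pass over the masked text, slicing
--     the tuples out of the original blob.
--     """
--     masked = _mask_strings(values_blob.split("'"))
--     tuples: List[str] = []
--     depth = 0
--     start = None
--     for i, ch in enumerate(masked):
--         if ch == "(":
--             if depth == 0:
--                 start = i
--             depth += 1
--         elif ch == ")":
--             depth -= 1
--             if depth == 0 and start is not None:
--                 tuples.append(values_blob[start : i + 1])
--                 start = None
--     return tuples
-- ===== Notes on version B (the rewrite author's own statement) =====
-- stated objective: alternative
-- what changed: Replaces A's single per-character scan carrying combined in_str/esc/depth state with two staged passes: pass 1 splits the blob on single quotes and blanks out the quoted regions (a region continues iff the segment ends in an odd run of backslashes), pass 2 is a plain parenthesis-depth pass over the masked text slicing tuples out of the original.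
import Mathlib
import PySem

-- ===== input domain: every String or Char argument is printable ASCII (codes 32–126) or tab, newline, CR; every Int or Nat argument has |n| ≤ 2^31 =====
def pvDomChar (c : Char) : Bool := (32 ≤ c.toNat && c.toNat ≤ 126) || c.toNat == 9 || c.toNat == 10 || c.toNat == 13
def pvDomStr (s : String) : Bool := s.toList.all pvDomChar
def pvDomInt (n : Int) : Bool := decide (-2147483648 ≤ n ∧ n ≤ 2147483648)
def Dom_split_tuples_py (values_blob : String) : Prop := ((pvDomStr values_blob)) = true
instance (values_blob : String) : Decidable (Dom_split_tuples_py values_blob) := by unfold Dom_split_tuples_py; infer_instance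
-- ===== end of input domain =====

-- B replaces A's single scan with flag state by two staged passes: split on quotes +
-- trailing-backslash parity blanks out quoted strings, then a plain paren-depth pass
-- (objective: alternative decomposition, same cost).


-- ===== PORT A =====
-- A's single while loop over the characters, carrying (i, in_str, esc, depth, start, tuples).
-- The slice values_blob[start:i+1] (here always 0 ≤ start ≤ i+1 ≤ n, so Python's slice is
-- exactly drop/take) is ported as (full.drop start).take (i+1-start).
def aLoop : List Char → List Char → Nat → Bool → Bool → Int → Option Nat → List String → List String
  | [], _, _, _, _, _, _, acc => acc
  | ch :: rest, full, i, in_str, esc, depth, start, acc =>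
    if in_str then
      if esc then aLoop rest full (i+1) true false depth start acc
      else if ch = '\\' then aLoop rest full (i+1) true true depth start acc
      else if ch = '\'' then aLoop rest full (i+1) false false depth start acc
      else aLoop rest full (i+1) true false depth start acc
    else
      if ch = '\'' then aLoop rest full (i+1) true false depth start acc
      else if ch = '(' then
        aLoop rest full (i+1) false false (depth+1)
          (if depth = 0 then some i else start) acc
      else if ch = ')' then
        match start with
        | some st =>
          if depth - 1 = 0 then
            aLoop rest full (i+1) false false (depth-1) none
              (acc ++ [String.ofList ((full.drop st).take (i+1-st))])
          else aLoop rest full (i+1) false false (depth-1) (some st) acc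
        | none => aLoop rest full (i+1) false false (depth-1) none acc
      else aLoop rest full (i+1) false false depth start acc

def split_tuples_py (values_blob : String) : List String :=
  aLoop values_blob.toList values_blob.toList 0 false false 0 none []

-- ===== PORT B =====
-- exact port of values_blob.split("'") (str.split with a one-character separator,
-- empties kept, result always nonempty)
def pySplitQ : List Char → List (List Char)
  | [] => [[]]
  | c :: rest =>
    if c = '\'' then [] :: pySplitQ rest
    else
      match pySplitQ rest with
      | h :: t => (c :: h) :: t
      | [] => [[c]]

-- port of _trailing_backslashes: count from the reversed segment
def tbGo : List Char → Nat
  | [] => 0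
  | c :: r => if c = '\\' then tbGo r + 1 else 0

def trailingBS (seg : List Char) : Nat := tbGo seg.reverse

-- port of _mask_strings's loop over the parts (inside flag; last part gets no quote)
def maskParts : List (List Char) → Bool → List Char
  | [], _ => []
  | [seg], inside => if inside then List.replicate seg.length ' ' else seg
  | seg :: r :: rs, inside =>
    if inside then
      List.replicate seg.length ' ' ++ ' ' :: maskParts (r :: rs) (trailingBS seg % 2 == 1)
    else seg ++ ' ' :: maskParts (r :: rs) true

-- port of B's second pass: for i, ch in enumerate(masked), paren depth only
def pLoop : List Char → List Char → Nat → Int → Option Nat → List String → List String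
  | [], _, _, _, _, acc => acc
  | ch :: rest, full, i, depth, start, acc =>
    if ch = '(' then
      pLoop rest full (i+1) (depth+1) (if depth = 0 then some i else start) acc
    else if ch = ')' then
      match start with
      | some st =>
        if depth - 1 = 0 then
          pLoop rest full (i+1) (depth-1) none
            (acc ++ [String.ofList ((full.drop st).take (i+1-st))])
        else pLoop rest full (i+1) (depth-1) (some st) acc
      | none => pLoop rest full (i+1) (depth-1) none acc
    else pLoop rest full (i+1) depth start acc

def split_tuples_py_alt (values_blob : String) : List String :=
  pLoop (maskParts (pySplitQ values_blob.toList) false) values_blob.toList 0 0 none []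

-- ===== PRECONDITION & SPEC =====
def Spec_split_tuples_py (values_blob : String) (out : List String) : Prop := out = split_tuples_py_alt values_blob
instance (values_blob : String) (out : List String) : Decidable (Spec_split_tuples_py values_blob out) := by unfold Spec_split_tuples_py; infer_instance

-- ===== CLAIM (what is proved, stated in full; the proofs are below) =====
def Claim_equal_split_tuples_py : Prop := ∀ (values_blob : String), Dom_split_tuples_py values_blob → Spec_split_tuples_py values_blob (split_tuples_py values_blob)

-- ===== LEMMAS AND PROOFS =====

-- reference masking state machine: what A's flags do to the text (strings → spaces)
def maskA : List Char → Bool → Bool → List Char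
  | [], _, _ => []
  | c :: rest, in_str, esc =>
    if in_str then
      if esc then ' ' :: maskA rest true false
      else if c = '\\' then ' ' :: maskA rest true true
      else if c = '\'' then ' ' :: maskA rest false false
      else ' ' :: maskA rest true false
    else
      if c = '\'' then ' ' :: maskA rest true false
      else c :: maskA rest false false

-- escape-flag evolution through a segment
def escOut : List Char → Bool → Bool
  | [], e => e
  | c :: r, e => escOut r (if e then false else c = '\\')

theorem escOut_append (s : List Char) (c : Char) (e : Bool) :
    escOut (s ++ [c]) e = (if escOut s e then false else c = '\\') := by
  induction s generalizing e with
  | nil => simp [escOut]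
  | cons a s ih => simp [escOut, ih]

theorem tbGo_parity (s : List Char) :
    escOut s false = (tbGo s.reverse % 2 == 1) := by
  induction s using List.reverseRecOn with
  | nil => simp [escOut, tbGo]
  | append_singleton s c ih =>
    rw [escOut_append, ih]
    by_cases hc : c = '\\'
    · simp only [hc, List.reverse_append, List.reverse_singleton, List.singleton_append, tbGo]
      rcases Nat.mod_two_eq_zero_or_one (tbGo s.reverse) with h | h <;>
        simp [h, Nat.add_mod]
    · simp [tbGo, hc]

theorem maskA_out_seg (seg rest : List Char) (h : '\'' ∉ seg) :
    maskA (seg ++ rest) false false = seg ++ maskA rest false false := by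
  induction seg with
  | nil => simp
  | cons c s ih =>
    simp only [List.mem_cons, not_or] at h
    simp [maskA, Ne.symm h.1, ih h.2]

theorem maskA_in_seg (seg : List Char) (h : '\'' ∉ seg) :
    ∀ (rest : List Char) (e : Bool),
      maskA (seg ++ rest) true e = List.replicate seg.length ' ' ++ maskA rest true (escOut seg e) := by
  induction seg with
  | nil => intro rest e; simp [escOut]
  | cons c s ih =>
    intro rest e
    simp only [List.mem_cons, not_or] at h
    cases e with
    | true => simp [maskA, escOut, ih h.2, List.replicate_succ]
    | false =>
      by_cases hc : c = '\\'
      · simp [maskA, hc, escOut, ih h.2, List.replicate_succ]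
      · simp [maskA, hc, Ne.symm h.1, escOut, ih h.2, List.replicate_succ]

theorem pySplitQ_ne_nil (s : List Char) : pySplitQ s ≠ [] := by
  cases s with
  | nil => simp [pySplitQ]
  | cons c rest =>
    simp only [pySplitQ]
    split
    · simp
    · split <;> simp

theorem pySplitQ_no_quote (s : List Char) (h : '\'' ∉ s) : pySplitQ s = [s] := by
  induction s with
  | nil => rfl
  | cons c rest ih =>
    simp only [List.mem_cons, not_or] at h
    simp [pySplitQ, Ne.symm h.1, ih h.2]

theorem pySplitQ_seg (seg rest : List Char) (h : '\'' ∉ seg) :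
    pySplitQ (seg ++ '\'' :: rest) = seg :: pySplitQ rest := by
  induction seg with
  | nil => simp [pySplitQ]
  | cons c s ih =>
    simp only [List.mem_cons, not_or] at h
    simp [pySplitQ, Ne.symm h.1, ih h.2]

-- first-quote decomposition
theorem quote_decomp (s : List Char) (h : '\'' ∈ s) :
    ∃ seg rest, s = seg ++ '\'' :: rest ∧ '\'' ∉ seg := by
  induction s with
  | nil => cases h
  | cons c t ih =>
    by_cases hc : c = '\''
    · exact ⟨[], t, by simp [hc], by simp⟩
    · have h' : '\'' ∈ t := by
        rcases List.mem_cons.mp h with h | h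
        · exact absurd h.symm hc
        · exact h
      rcases ih h' with ⟨seg, rest, he, hn⟩
      refine ⟨c :: seg, rest, by simp [he], ?_⟩
      simp only [List.mem_cons, not_or]
      exact ⟨fun hh => hc hh.symm, hn⟩

-- the split-and-parity mask equals the state-machine mask (both start states)
theorem maskParts_eq_maskA (n : Nat) :
    ∀ (s : List Char), s.length ≤ n →
      maskParts (pySplitQ s) false = maskA s false false ∧
      maskParts (pySplitQ s) true = maskA s true false := by
  induction n with
  | zero =>
    intro s hs
    have : s = [] := List.eq_nil_of_length_eq_zero (Nat.le_zero.mp hs)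
    subst this
    simp [pySplitQ, maskParts, maskA]
  | succ n ih =>
    intro s hs
    by_cases hq : '\'' ∈ s
    · rcases quote_decomp s hq with ⟨seg, rest, he, hn⟩
      subst he
      have hlen : rest.length ≤ n := by
        have := hs; simp [List.length_append] at this; omega
      have hps := pySplitQ_ne_nil rest
      rw [pySplitQ_seg seg rest hn]
      constructor
      · rw [maskA_out_seg seg _ hn]
        have hquote : maskA ('\'' :: rest) false false = ' ' :: maskA rest true false := by
          simp [maskA]
        rw [hquote]
        cases hrest : pySplitQ rest with
        | nil => exact absurd hrest hps
        | cons r rs =>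
          simp only [maskParts]
          rw [← hrest]
          simp [(ih rest hlen).2]
      · rw [maskA_in_seg seg hn ('\'' :: rest) false]
        rw [tbGo_parity seg]
        cases hrest : pySplitQ rest with
        | nil => exact absurd hrest hps
        | cons r rs =>
          simp only [maskParts]
          rw [← hrest]
          by_cases hp : (tbGo seg.reverse % 2 == 1) = true
          · have hA : maskA ('\'' :: rest) true true = ' ' :: maskA rest true false := by
              simp [maskA]
            rw [hp, hA]
            simp [trailingBS, hp, (ih rest hlen).2]
          · have hp' : (tbGo seg.reverse % 2 == 1) = false := by
              cases h' : (tbGo seg.reverse % 2 == 1) <;> simp_all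
            have hA : maskA ('\'' :: rest) true false = ' ' :: maskA rest false false := by
              simp [maskA]
            rw [hp', hA]
            simp [trailingBS, hp', (ih rest hlen).1]
    · rw [pySplitQ_no_quote s hq]
      constructor
      · have := maskA_out_seg s [] hq
        simp at this
        simp [maskParts, this, maskA]
      · have := maskA_in_seg s hq [] false
        simp at this
        simp [maskParts, this, maskA]

-- A's whole loop equals the paren-only pass over the state-machine mask
theorem aLoop_eq_pLoop_maskA :
    ∀ (s full : List Char) (i : Nat) (istr esc : Bool) (d : Int) (st : Option Nat) (acc : List String),
      aLoop s full i istr esc d st acc = pLoop (maskA s istr esc) full i d st acc := by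
  intro s
  induction s with
  | nil => intro full i istr esc d st acc; simp [aLoop, maskA, pLoop]
  | cons c rest ih =>
    intro full i istr esc d st acc
    cases istr with
    | true =>
      cases esc with
      | true => simp [aLoop, maskA, pLoop, ih]
      | false =>
        by_cases h1 : c = '\\'
        · simp [aLoop, maskA, pLoop, h1, ih]
        · by_cases h2 : c = '\''
          · simp [aLoop, maskA, pLoop, h1, h2, ih]
          · simp [aLoop, maskA, pLoop, h1, h2, ih]
    | false =>
      by_cases h2 : c = '\''
      · simp [aLoop, maskA, pLoop, h2, ih]
      · by_cases h3 : c = '('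
        · simp [aLoop, maskA, pLoop, h2, h3, ih]
        · by_cases h4 : c = ')'
          · cases st with
            | none => simp [aLoop, maskA, pLoop, h2, h3, h4, ih]
            | some stv =>
              by_cases h5 : d - 1 = 0 <;>
                simp [aLoop, maskA, pLoop, h2, h3, h4, h5, ih]
          · simp [aLoop, maskA, pLoop, h2, h3, h4, ih]

-- ===== VERDICT (by name: the statement is the Claim_ definition above) =====
theorem split_tuples_py_spec : Claim_equal_split_tuples_py := by
  intro s _
  unfold Spec_split_tuples_py split_tuples_py split_tuples_py_alt
  rw [aLoop_eq_pLoop_maskA,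
    (maskParts_eq_maskA s.toList.length s.toList le_rfl).1]
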